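-- pv_equiv track=rewrite | github.com/bigd-art/nfl-visuals-backend | app/services/storage_supabase.py | _clean_prefix
-- ===== SOURCE A (Python) =====
-- def _clean_prefix(prefix: str) -> str:
--     """
--     Normalize a folder prefix used for list().
--     Supabase list() expects a "folder" path.
--     """
--     p = (prefix or "").strip()
--     p = p.lstrip("/")
--     while "//" in p:
--         p = p.replace("//", "/")
--     # allow root listing with ""
--     if p and not p.endswith("/"):
--         p += "/"
--     return p
-- ===== SOURCE B (Python) =====
-- def _clean_prefix(prefix: str) -> str:
--     out = []
--     for c in (prefix or "").strip():
--         if c == "/" and (not out or out[-1] == "/"):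
--             continue
--         out.append(c)
--     if out and out[-1] != "/":
--         out.append("/")
--     return "".join(out)
-- ===== Notes on version B (the rewrite author's own statement) =====
-- stated objective: alternative
-- what changed: Replaces lstrip plus a repeated global replace('//','/') rewrite loop with a single left-to-right pass that emits each character once, skipping a slash when nothing has been emitted yet or the previous emitted character is a slash.
import Mathlib
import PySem

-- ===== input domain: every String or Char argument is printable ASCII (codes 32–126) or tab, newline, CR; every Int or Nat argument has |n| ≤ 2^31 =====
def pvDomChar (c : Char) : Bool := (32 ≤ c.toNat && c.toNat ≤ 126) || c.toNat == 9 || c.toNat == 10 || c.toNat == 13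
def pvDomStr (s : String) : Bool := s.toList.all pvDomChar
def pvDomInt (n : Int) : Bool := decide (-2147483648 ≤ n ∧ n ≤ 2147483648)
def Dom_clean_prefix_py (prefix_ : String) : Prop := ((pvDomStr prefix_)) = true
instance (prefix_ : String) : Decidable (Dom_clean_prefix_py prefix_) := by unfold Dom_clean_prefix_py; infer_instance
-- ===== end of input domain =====

-- B replaces A's lstrip plus repeated global replace("//","/") passes with a single
-- left-to-right pass that appends each kept character once (objective: alternative).

-- ===== PORT A =====

-- proof-side model of one replace("//","/") pass (used only to justify termination of A's while-loop)
def pvRep : List Char → List Char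
  | [] => []
  | [c] => [c]
  | c1 :: c2 :: t => if c1 = '/' ∧ c2 = '/' then c1 :: pvRep t else c1 :: pvRep (c2 :: t)

theorem pvRep_length_le (cs : List Char) : (pvRep cs).length ≤ cs.length := by
  induction cs using pvRep.induct with
  | case1 => simp [pvRep]
  | case2 c => simp [pvRep]
  | case3 c1 c2 t h ih => simp [pvRep, h]; omega
  | case4 c1 c2 t h ih => simp [pvRep, h] at ih ⊢; omega

theorem pvGo_eq (fuel : Nat) (l acc : List Char) (h : l.length ≤ fuel) :
    PySem.Chars.replace.go ['/', '/'] ['/'] fuel l acc = acc.reverse ++ pvRep l := by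
  induction fuel generalizing l acc with
  | zero =>
    have : l = [] := by cases l <;> simp_all
    subst this
    rw [PySem.Chars.replace.go.eq_def]
    simp [pvRep]
  | succ fuel ih =>
    cases l with
    | nil => rw [PySem.Chars.replace.go.eq_def]; simp [pvRep]
    | cons c t =>
      rw [PySem.Chars.replace.go.eq_def]
      simp only []
      by_cases hp : ['/', '/'].isPrefixOf (c :: t) = true
      · -- l starts with "//"
        obtain ⟨hc, u, hu⟩ : c = '/' ∧ ∃ u, t = '/' :: u := by
          cases t with
          | nil => simp [List.isPrefixOf] at hp
          | cons d u =>
            simp [List.isPrefixOf] at hp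
            exact ⟨hp.1.symm, u, by rw [← hp.2]⟩
        subst hc hu
        simp only [hp, if_true]
        have hlen : u.length ≤ fuel := by simp at h; omega
        have hd : List.drop ['/', '/'].length ('/' :: '/' :: u) = u := rfl
        have hrv : ['/'].reverse ++ acc = '/' :: acc := rfl
        rw [hd, hrv, ih _ _ hlen]
        simp [pvRep]
      · simp only [hp]
        have hlen : t.length ≤ fuel := by simp at h; omega
        rw [ih _ _ hlen]
        have hrep : pvRep (c :: t) = c :: pvRep t := by
          cases t with
          | nil => simp [pvRep]
          | cons d u =>
            have : ¬ (c = '/' ∧ d = '/') := by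
              intro ⟨h1, h2⟩; subst h1; subst h2; simp [List.isPrefixOf] at hp
            simp [pvRep, this]
        simp [hrep]

theorem pvReplace_eq (cs : List Char) :
    PySem.Chars.replace cs ['/', '/'] ['/'] = pvRep cs := by
  rw [PySem.Chars.replace]
  simp only [List.isEmpty_cons]
  rw [pvGo_eq cs.length cs [] (le_refl _)]
  simp

theorem pvRep_length_lt (cs : List Char) (h : ['/', '/'] <:+: cs) :
    (pvRep cs).length < cs.length := by
  induction cs using pvRep.induct with
  | case1 => simp at h
  | case2 c =>
    have := h.sublist.length_le
    simp at this
  | case3 c1 c2 t hc ih =>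
    have := pvRep_length_le t
    simp [pvRep, hc]
    omega
  | case4 c1 c2 t hc ih =>
    have ht : ['/', '/'] <:+: (c2 :: t) := by
      rcases List.infix_cons_iff.mp h with hpre | hinf
      · exfalso
        rcases hpre with ⟨s, hs⟩
        simp only [List.cons_append, List.nil_append] at hs
        injection hs with e1 rest
        injection rest with e2 _
        exact hc ⟨e1.symm, e2.symm⟩
      · exact hinf
    have := ih ht
    simp only [pvRep, if_neg hc, List.length_cons] at this ⊢
    omega

theorem pvReplace_length_lt (cs : List Char) (h : PySem.Chars.isIn ['/', '/'] cs = true) :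
    (PySem.Chars.replace cs ['/', '/'] ['/']).length < cs.length := by
  rw [pvReplace_eq]
  apply pvRep_length_lt cs
  by_contra hn
  rw [(PySem.Chars.isIn_eq_false_iff ['/', '/'] cs).mpr hn] at h
  simp at h

-- while "//" in p: p = p.replace("//", "/")
def pvCollapse (cs : List Char) : List Char :=
  if PySem.Chars.isIn ['/', '/'] cs = true then
    pvCollapse (PySem.Chars.replace cs ['/', '/'] ['/'])
  else cs
termination_by cs.length
decreasing_by exact pvReplace_length_lt cs ‹_›

def clean_prefix_py (prefix_ : String) : String :=
  -- p = (prefix or "").strip()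
  let p0 := if prefix_ = "" then "" else prefix_
  let p1 := (PySem.Str.strip p0).toList
  -- p = p.lstrip("/")  (strip the leading characters of the one-char set {'/'}; exact)
  let p2 := p1.dropWhile (fun c => c == '/')
  -- while "//" in p: p = p.replace("//", "/")
  let p3 := pvCollapse p2
  -- if p and not p.endswith("/"): p += "/"
  if p3 ≠ [] ∧ PySem.Chars.endswith p3 ['/'] = false then String.mk (p3 ++ ['/']) else String.mk p3

-- ===== PORT B =====

-- loop body: skip c == '/' when nothing emitted yet or the last emitted char is '/'
def pvStep (acc : List Char) (c : Char) : List Char :=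
  if c = '/' ∧ (acc = [] ∨ acc.getLast? = some '/') then acc else acc ++ [c]

def clean_prefix_py_alt (prefix_ : String) : String :=
  let t := (PySem.Str.strip (if prefix_ = "" then "" else prefix_)).toList
  let out := t.foldl pvStep []
  let out2 := if out ≠ [] ∧ out.getLast? ≠ some '/' then out ++ ['/'] else out
  String.mk out2

-- ===== PRECONDITION & SPEC =====
def Spec_clean_prefix_py (prefix_ : String) (out : String) : Prop := out = clean_prefix_py_alt prefix_
instance (prefix_ : String) (out : String) : Decidable (Spec_clean_prefix_py prefix_ out) := by unfold Spec_clean_prefix_py; infer_instance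

-- ===== CLAIM (what is proved, stated in full; the proofs are below) =====
def Claim_equal_clean_prefix_py : Prop := ∀ (prefix_ : String), Dom_clean_prefix_py prefix_ → Spec_clean_prefix_py prefix_ (clean_prefix_py prefix_)

-- ===== LEMMAS AND PROOFS =====

-- canonical slash-collapsed form: pvSqA p t keeps t's chars, dropping a '/' after a '/'
def pvSqA (p : Char) : List Char → List Char
  | [] => []
  | c :: t => if c = '/' ∧ p = '/' then pvSqA p t else c :: pvSqA c t

def pvSq : List Char → List Char
  | [] => []
  | c :: t => c :: pvSqA c t

theorem pvSqA_rep (t : List Char) (p : Char) : pvSqA p (pvRep t) = pvSqA p t := by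
  induction t using pvRep.induct generalizing p with
  | case1 => simp [pvRep]
  | case2 c => simp [pvRep]
  | case3 c1 c2 t hc ih =>
    obtain ⟨h1, h2⟩ := hc; subst h1; subst h2
    simp only [pvRep]
    by_cases hp : p = '/'
    · simp [pvSqA, hp, ih]
    · simp [pvSqA, hp, ih]
  | case4 c1 c2 t hc ih =>
    simp only [pvRep, if_neg hc]
    by_cases hp : c1 = '/' ∧ p = '/'
    · simp [pvSqA, hp, ih]
    · simp [pvSqA, hp, ih]

theorem pvSq_rep (cs : List Char) : pvSq (pvRep cs) = pvSq cs := by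
  cases cs with
  | nil => rfl
  | cons c t =>
    cases t with
    | nil => rfl
    | cons d u =>
      by_cases hc : c = '/' ∧ d = '/'
      · obtain ⟨h1, h2⟩ := hc; subst h1; subst h2
        simp [pvRep, pvSq, pvSqA, pvSqA_rep]
      · simp [pvRep, hc, pvSq, pvSqA_rep]

theorem pvSqA_no_dup (t : List Char) (p : Char) (h : ¬ ['/', '/'] <:+: (p :: t)) :
    pvSqA p t = t := by
  induction t generalizing p with
  | nil => rfl
  | cons c u ih =>
    by_cases hc : c = '/' ∧ p = '/'
    · exfalso
      apply h
      obtain ⟨h1, h2⟩ := hc; subst h1; subst h2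
      exact ⟨[], u, rfl⟩
    · have : ¬ ['/', '/'] <:+: (c :: u) := fun hin => h (hin.trans (List.suffix_cons p (c :: u)).isInfix)
      simp [pvSqA, hc, ih c this]

theorem pvSq_no_dup (cs : List Char) (h : ¬ ['/', '/'] <:+: cs) : pvSq cs = cs := by
  cases cs with
  | nil => rfl
  | cons c t => simp [pvSq, pvSqA_no_dup t c h]

theorem pvCollapse_eq_sq (cs : List Char) : pvCollapse cs = pvSq cs := by
  induction cs using pvCollapse.induct with
  | case1 cs h ih =>
    rw [pvCollapse, if_pos h, ih, pvReplace_eq, pvSq_rep]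
  | case2 cs h =>
    rw [pvCollapse, if_neg h]
    have hf : PySem.Chars.isIn ['/', '/'] cs = false := by
      cases hb : PySem.Chars.isIn ['/', '/'] cs
      · rfl
      · exact absurd hb h
    exact (pvSq_no_dup cs ((PySem.Chars.isIn_eq_false_iff ['/', '/'] cs).mp hf)).symm

theorem pvFoldl_step_ne (t : List Char) (acc : List Char) (p : Char)
    (h : acc.getLast? = some p) : t.foldl pvStep acc = acc ++ pvSqA p t := by
  induction t generalizing acc p with
  | nil => simp [pvSqA]
  | cons c u ih =>
    have hne : acc ≠ [] := by intro he; simp [he] at h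
    by_cases hc : c = '/' ∧ p = '/'
    · have hstep : pvStep acc c = acc := by
        simp [pvStep, hc.1, h, hc.2]
      simp only [List.foldl_cons, hstep, pvSqA, if_pos hc]
      exact ih acc p h
    · have hstep : pvStep acc c = acc ++ [c] := by
        unfold pvStep
        rw [if_neg]
        intro ⟨h1, h2⟩
        rcases h2 with h2 | h2
        · exact hne h2
        · rw [h] at h2; injection h2 with h2
          exact hc ⟨h1, h2⟩
      simp only [List.foldl_cons, hstep, pvSqA, if_neg hc]
      rw [ih (acc ++ [c]) c (by simp)]
      simp

theorem pvFoldl_step_nil (t : List Char) :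
    t.foldl pvStep [] = pvSq (t.dropWhile (fun c => c == '/')) := by
  induction t with
  | nil => rfl
  | cons c u ih =>
    by_cases hc : c = '/'
    · have hstep : pvStep [] c = [] := by simp [pvStep, hc]
      rw [List.foldl_cons, hstep, List.dropWhile_cons]
      simpa [hc] using ih
    · have hstep : pvStep [] c = [c] := by
        simp [pvStep, hc]
      simp only [List.foldl_cons, hstep, List.dropWhile_cons]
      rw [pvFoldl_step_ne u [c] c (by simp)]
      simp [hc, pvSq]

theorem pvEndswith_slash (r : List Char) :
    (PySem.Chars.endswith r ['/'] = false) ↔ ¬ (r.getLast? = some '/') := by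
  induction r using List.reverseRecOn with
  | nil => simp [PySem.Chars.endswith, List.isSuffixOf]
  | append_singleton s a _ =>
    have h1 : PySem.Chars.endswith (s ++ [a]) ['/'] = ('/' == a) := by
      simp [PySem.Chars.endswith, List.isSuffixOf, List.isPrefixOf]
    rw [h1, List.getLast?_concat]
    constructor
    · intro hf he
      injection he with he
      subst he
      simp at hf
    · intro hne
      cases hb : ('/' == a)
      · rfl
      · exact absurd (congrArg (some ·) (eq_of_beq hb).symm) hne

theorem pvFinal (r : List Char) :
    (if r ≠ [] ∧ PySem.Chars.endswith r ['/'] = false then String.mk (r ++ ['/']) else String.mk r)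
      = String.mk (if r ≠ [] ∧ r.getLast? ≠ some '/' then r ++ ['/'] else r) := by
  rw [apply_ite String.mk]
  exact if_congr (and_congr_right (fun _ => pvEndswith_slash r)) rfl rfl

-- ===== VERDICT (by name: the statement is the Claim_ definition above) =====
theorem clean_prefix_py_spec : Claim_equal_clean_prefix_py := by
  intro prefix_ _
  unfold Spec_clean_prefix_py clean_prefix_py clean_prefix_py_alt
  simp only []
  rw [pvCollapse_eq_sq, pvFoldl_step_nil, pvFinal]
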